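-- pv_equiv track=rewrite | github.com/skanderkaroui/Coding-Problems-Practice | D_UCL_Final.py | ucl_final
-- ===== SOURCE A (Python) =====
-- from collections import Counter
--
-- def ucl_final(n, goals):
--     if n == 1:
--         return goals[0]
--
--     goal_counts = Counter(goals)
--     max_goals = max(goal_counts.values())
--
--     winners = [team for team, count in goal_counts.items() if count == max_goals]
--
--     if len(winners) > 1:
--         for goal in reversed(goals):
--             if goal in winners:
--                 return goal
--     else:
--         return winners[0]
-- ===== SOURCE B (Python) =====
-- def ucl_final(n, goals):
--     if n == 1:
--         return goals[0]
--     counts = {}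
--     for g in goals:
--         counts[g] = counts.get(g, 0) + 1
--     best = None
--     for g in reversed(goals):
--         if best is None or counts[g] > counts[best]:
--             best = g
--     return best
-- ===== Notes on version B (the rewrite author's own statement) =====
-- stated objective: simpler
-- what changed: Replaces Counter + max-of-values + winners list + len(winners) branch + reversed membership scan with a hand-built count dict and one reversed running-argmax pass whose strict > comparison yields the latest-occurrence tie-break directly.
import Mathlib
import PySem

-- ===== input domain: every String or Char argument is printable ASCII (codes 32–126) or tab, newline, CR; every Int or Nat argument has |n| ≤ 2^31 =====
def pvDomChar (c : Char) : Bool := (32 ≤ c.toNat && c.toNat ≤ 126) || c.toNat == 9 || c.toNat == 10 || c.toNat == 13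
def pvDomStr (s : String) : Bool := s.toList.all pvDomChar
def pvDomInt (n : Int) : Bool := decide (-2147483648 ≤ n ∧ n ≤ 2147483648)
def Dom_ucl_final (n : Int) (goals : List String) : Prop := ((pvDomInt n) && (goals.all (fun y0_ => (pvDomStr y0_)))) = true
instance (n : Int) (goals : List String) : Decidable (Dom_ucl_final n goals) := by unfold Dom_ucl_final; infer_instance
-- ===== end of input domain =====

-- B replaces Counter/max/winners-list/branching with a count dict plus one reversed
-- running-argmax scan (strict > gives the latest-occurrence tie-break): simpler, same O(n+k) cost.

-- ===== PORT A =====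
def ucl_final (n : Int) (goals : List String) : String :=
  if n == 1 then (PySem.List.pyGet? goals 0).getD ""
  else
    let goal_counts := PySem.Dict.counter goals
    let max_goals := (PySem.List.max? goal_counts.values (fun v => v)).getD 0
    let winners := (goal_counts.items.filter (fun p => p.2 == max_goals)).map Prod.fst
    if winners.length > 1 then
      (goals.reverse.find? (fun g => winners.contains g)).getD ""
    else
      (PySem.List.pyGet? winners 0).getD ""

-- ===== PORT B =====
def ucl_final_alt (n : Int) (goals : List String) : String :=
  if n == 1 then (PySem.List.pyGet? goals 0).getD ""
  else
    let counts : PySem.Dict String Int := goals.foldl (fun d g => d.insert g (d.getD g 0 + 1)) PySem.Dict.empty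
    let best := goals.reverse.foldl
      (fun best g =>
        match best with
        | none => some g
        | some b => if counts.getD g 0 > counts.getD b 0 then some g else some b)
      none
    best.getD ""

-- ===== PRECONDITION & SPEC =====
-- Pre_ excludes only goals = [], where Python A raises (IndexError if n == 1, else ValueError from max()).
def Pre_ucl_final (n : Int) (goals : List String) : Prop := goals ≠ []
instance (n : Int) (goals : List String) : Decidable (Pre_ucl_final n goals) := by unfold Pre_ucl_final; infer_instance
def pvWitness_ucl_final : Int × List String := (3, ["ars", "bay", "ars"])

def Spec_ucl_final (n : Int) (goals : List String) (out : String) : Prop := out = ucl_final_alt n goals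
instance (n : Int) (goals : List String) (out : String) : Decidable (Spec_ucl_final n goals out) := by unfold Spec_ucl_final; infer_instance

-- ===== CLAIM (what is proved, stated in full; the proofs are below) =====
def Claim_equal_ucl_final : Prop := ∀ (n : Int) (goals : List String), Dom_ucl_final n goals → Pre_ucl_final n goals → Spec_ucl_final n goals (ucl_final n goals)

-- ===== LEMMAS AND PROOFS =====

-- the running-argmax step of B's reversed scan, abstracted over the key
def pvStep (key : String → Int) (acc : Option String) (g : String) : Option String :=
  match acc with
  | none => some g
  | some b => if key g > key b then some g else some b

theorem pv_foldl_some (key : String → Int) (l : List String) (b : String) :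
    ∃ m, l.foldl (pvStep key) (some b) = some m := by
  induction l generalizing b with
  | nil => exact ⟨b, rfl⟩
  | cons x t ih =>
    simp only [List.foldl_cons, pvStep]
    split <;> exact ih _

theorem pv_foldl_mono (key : String → Int) (l : List String) (b m : String)
    (h : l.foldl (pvStep key) (some b) = some m) : key b ≤ key m := by
  induction l generalizing b with
  | nil => simp at h; simp [h]
  | cons x t ih =>
    simp only [List.foldl_cons, pvStep] at h
    split at h
    · exact le_trans (le_of_lt (by assumption)) (ih _ h)
    · exact ih _ h

theorem pv_foldl_isMax (key : String → Int) (l : List String) (b m : String)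
    (h : l.foldl (pvStep key) (some b) = some m) : ∀ y ∈ b :: l, key y ≤ key m := by
  induction l generalizing b with
  | nil => simp at h; simp [h]
  | cons x t ih =>
    intro y hy
    simp only [List.foldl_cons, pvStep] at h
    simp only [List.mem_cons] at hy
    split at h
    · rcases hy with rfl | rfl | hy
      · exact le_trans (le_of_lt (by assumption)) (pv_foldl_mono key t x m h)
      · exact pv_foldl_mono key t _ m h
      · exact ih x h y (by simp [hy])
    · rcases hy with rfl | rfl | hy
      · exact pv_foldl_mono key t _ m h
      · exact le_trans (le_of_not_gt (by assumption)) (pv_foldl_mono key t b m h)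
      · exact ih b h y (by simp [hy])

theorem pv_foldl_mem (key : String → Int) (l : List String) (b m : String)
    (h : l.foldl (pvStep key) (some b) = some m) : m ∈ b :: l := by
  induction l generalizing b with
  | nil => simp at h; simp [h]
  | cons x t ih =>
    simp only [List.foldl_cons, pvStep] at h
    split at h
    · have := ih x h; simp only [List.mem_cons] at this ⊢; tauto
    · have := ih b h; simp only [List.mem_cons] at this ⊢; tauto

theorem pv_foldl_find (key : String → Int) (l : List String) (b m : String)
    (h : l.foldl (pvStep key) (some b) = some m) :
    List.find? (fun g => decide (key m ≤ key g)) (b :: l) = some m := by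
  induction l generalizing b with
  | nil =>
    simp at h; subst h; simp
  | cons x t ih =>
    simp only [List.foldl_cons, pvStep] at h
    split at h
    · -- key x > key b : acc becomes x; b cannot satisfy the predicate
      have hxm : key x ≤ key m := pv_foldl_mono key t x m h
      have hbm : ¬ key m ≤ key b := by
        have : key b < key x := by assumption
        omega
      have := ih x h
      simp only [List.find?_cons] at this ⊢
      simp [hbm, this]
    · -- acc stays b
      have hxb : key x ≤ key b := le_of_not_gt (by assumption)
      have := ih b h
      by_cases hb : key m ≤ key b
      · -- find? fires at b on both lists; and from `this`, m = b
        have hmb : m = b := by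
          simp only [List.find?_cons] at this
          simp [hb] at this
          exact this.symm
        simp [hmb]
      · have hx : ¬ key m ≤ key x := fun hc => hb (le_trans hc hxb)
        simp only [List.find?_cons] at this ⊢
        simp [hb] at this
        simp [hb, hx, this]

theorem pv_find?_congr {α : Type} (l : List α) (p q : α → Bool)
    (h : ∀ x ∈ l, p x = q x) : l.find? p = l.find? q := by
  induction l with
  | nil => rfl
  | cons x t ih =>
    simp only [List.find?_cons]
    rw [h x (by simp)]
    split
    · rfl
    · exact ih (fun y hy => h y (by simp [hy]))

-- ===== VERDICT (by name: the statement is the Claim_ definition above) =====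
theorem ucl_final_spec : Claim_equal_ucl_final := by
  intro n goals _ hpre
  by_cases hn : (n == 1) = true
  · simp only [Spec_ucl_final, ucl_final, ucl_final_alt, hn, if_true]
  · simp only [Spec_ucl_final, ucl_final, ucl_final_alt, hn, Bool.false_eq_true, if_false]
    set K : String → Int := fun g => (goals.count g : Int) with hK
    -- B's count dict looks up the occurrence count, so B's loop is the abstract argmax loop
    have hBfold : (fun (best : Option String) (g : String) =>
        match best with
        | none => some g
        | some b => if (goals.foldl (fun d g => d.insert g (d.getD g 0 + 1)) (PySem.Dict.empty : PySem.Dict String Int)).getD g 0 >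
                       (goals.foldl (fun d g => d.insert g (d.getD g 0 + 1)) (PySem.Dict.empty : PySem.Dict String Int)).getD b 0
                    then some g else some b) = pvStep K := by
      funext acc g
      cases acc with
      | none => rfl
      | some b =>
        simp only [pvStep]
        rw [PySem.Dict.getD_foldl_insert_add_one, PySem.Dict.getD_foldl_insert_add_one,
            PySem.Dict.getD_empty]
        simp [hK]
    obtain ⟨h0, t0, hrev⟩ : ∃ h t, goals.reverse = h :: t := by
      cases hg : goals.reverse with
      | nil => exact absurd (by simpa using hg) hpre
      | cons a b => exact ⟨a, b, rfl⟩
    obtain ⟨m, hm⟩ := pv_foldl_some K t0 h0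
    have hfold : goals.reverse.foldl (pvStep K) none = some m := by
      rw [hrev]; simpa [pvStep] using hm
    have hmax : ∀ y ∈ goals, K y ≤ K m := by
      intro y hy
      exact pv_foldl_isMax K t0 h0 m hm y (by rw [← hrev]; simpa using hy)
    have hmmem : m ∈ goals := by
      have : m ∈ goals.reverse := by rw [hrev]; exact pv_foldl_mem K t0 h0 m hm
      simpa using this
    -- A's max of Counter values equals K m
    have hvals : (PySem.Dict.counter goals).values = (PySem.Set.ofList goals).map (fun k => (goals.count k : Int)) := by
      show ((PySem.Dict.counter goals).items.map Prod.snd) = _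
      rw [PySem.Dict.items_counter]
      simp [List.map_map, Function.comp]
    have hvne : (PySem.Dict.counter goals).values ≠ [] := by
      rw [hvals]
      simp only [ne_eq, List.map_eq_nil_iff]
      intro hc
      have := (PySem.Set.mem_ofList goals m).mpr hmmem
      rw [hc] at this; simp at this
    obtain ⟨M, hM⟩ : ∃ M, PySem.List.max? (PySem.Dict.counter goals).values (fun v => v) = some M := by
      cases h : PySem.List.max? (PySem.Dict.counter goals).values (fun v => v) with
      | none => exact absurd ((PySem.List.max?_eq_none_iff _ _).mp h) hvne
      | some M => exact ⟨M, rfl⟩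
    have hMeq : M = K m := by
      have hMmem : M ∈ (PySem.Dict.counter goals).values := PySem.List.max?_mem hM
      rw [hvals] at hMmem
      obtain ⟨k, hk, hkM⟩ := List.mem_map.mp hMmem
      have hkg : k ∈ goals := (PySem.Set.mem_ofList goals k).mp hk
      have h1 : M ≤ K m := by rw [← hkM]; exact hmax k hkg
      have h2 : K m ≤ M := by
        have hin : K m ∈ (PySem.Dict.counter goals).values := by
          rw [hvals]
          exact List.mem_map.mpr ⟨m, (PySem.Set.mem_ofList goals m).mpr hmmem, rfl⟩
        exact PySem.List.max?_isMax hM _ hin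
      omega
    rw [hM]
    simp only [Option.getD_some]
    set winners := ((PySem.Dict.counter goals).items.filter (fun p => p.2 == M)).map Prod.fst with hw
    have hwin : ∀ g, g ∈ winners ↔ (g ∈ goals ∧ K g = M) := by
      intro g
      rw [hw, PySem.Dict.items_counter]
      simp only [List.mem_map, List.mem_filter, beq_iff_eq]
      constructor
      · rintro ⟨p, ⟨⟨k, hk, rfl⟩, h2⟩, rfl⟩
        exact ⟨(PySem.Set.mem_ofList goals k).mp hk, by simpa [hK] using h2⟩
      · rintro ⟨hg, hKg⟩
        refine ⟨(g, (goals.count g : Int)), ⟨⟨g, (PySem.Set.mem_ofList goals g).mpr hg, rfl⟩, ?_⟩, rfl⟩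
        simpa [hK] using hKg
    have hmwin : m ∈ winners := (hwin m).mpr ⟨hmmem, hMeq.symm⟩
    rw [hBfold, hfold]
    simp only [Option.getD_some]
    by_cases hlen : winners.length > 1
    · rw [if_pos hlen]
      have hfind : goals.reverse.find? (fun g => winners.contains g) = some m := by
        have hcongr : goals.reverse.find? (fun g => winners.contains g)
            = goals.reverse.find? (fun g => decide (K m ≤ K g)) := by
          apply pv_find?_congr
          intro x hx
          have hxg : x ∈ goals := by simpa using hx
          have hxle : K x ≤ K m := hmax x hxg
          rw [Bool.eq_iff_iff]
          simp only [List.contains_iff_mem, decide_eq_true_eq]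
          rw [hwin x]
          constructor
          · rintro ⟨-, hKx⟩; omega
          · intro hle; exact ⟨hxg, by omega⟩
        rw [hcongr, hrev]
        exact pv_foldl_find K t0 h0 m hm
      rw [hfind]; rfl
    · rw [if_neg hlen]
      have hsingle : winners = [m] := by
        cases hwcase : winners with
        | nil => rw [hwcase] at hmwin; simp at hmwin
        | cons w ws =>
          cases ws with
          | nil =>
            rw [hwcase] at hmwin
            simp at hmwin
            rw [hmwin]
          | cons w2 ws2 => exact absurd (by rw [hwcase]; simp) hlen
      rw [hsingle]
      simp [PySem.List.pyGet?, PySem.List.pyIdx?]
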